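-- pv_equiv track=rewrite | github.com/Taoge123/OptimizedLeetcode | LeetcodeNew/python/LC_907.py | rightSmall
-- ===== SOURCE A (Python) =====
-- def rightSmall(nums):
--     n = len(nums)
--     right, stack = [-1] * n, []
--
--     for i in range(n):
--         # To maintain stack as a monotonically increasing stack
--         while stack and nums[i] < nums[stack[-1]]:
--             # When curr nums[i] is smaller to the nums in stack.
--             right[stack.pop()] = i
--         stack.append(i)
--
--     for i in range(n):
--         right[i] = n - i if right[i] == -1 else right[i] - i
--
--     return right
-- ===== SOURCE B (Python) =====
-- def rightSmall(nums):
--     n = len(nums)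
--     res = []
--     for i in range(n):
--         d = n - i
--         for j in range(i + 1, n):
--             if nums[j] < nums[i]:
--                 d = j - i
--                 break
--         res.append(d)
--     return res
-- ===== Notes on version B (the rewrite author's own statement) =====
-- stated objective: simpler
-- what changed: Replaced the monotonic index stack plus post-pass with a plain per-index forward scan that directly finds the first strictly smaller element (defaulting to n-i).
import Mathlib
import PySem

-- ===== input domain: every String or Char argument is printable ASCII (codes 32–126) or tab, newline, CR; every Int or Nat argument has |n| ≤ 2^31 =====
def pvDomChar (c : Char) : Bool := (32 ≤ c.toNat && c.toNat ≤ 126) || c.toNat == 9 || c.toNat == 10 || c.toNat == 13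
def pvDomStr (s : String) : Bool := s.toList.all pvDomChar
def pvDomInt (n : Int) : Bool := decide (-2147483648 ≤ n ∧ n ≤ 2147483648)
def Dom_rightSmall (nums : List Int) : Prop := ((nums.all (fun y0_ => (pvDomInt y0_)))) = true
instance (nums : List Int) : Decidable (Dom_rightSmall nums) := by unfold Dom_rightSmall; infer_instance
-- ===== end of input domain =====

-- B replaces A's monotonic index stack (plus a second rewrite pass) by a plain per-index
-- forward scan for the first strictly smaller element; simpler, not faster.

-- ===== PORT A =====
-- A's inner `while stack and nums[i] < nums[stack[-1]]: right[stack.pop()] = i`.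
-- The stack holds nonnegative list indices; it is kept top-at-head (Python's append/pop
-- at the end become cons/uncons here), which is the same stack discipline.
def popLoop (nums : List Int) (i : Nat) : List Int → List Nat → List Int × List Nat
  | right, [] => (right, [])
  | right, t :: rest =>
    if nums.getD i 0 < nums.getD t 0 then popLoop nums i (right.set t (i : Int)) rest
    else (right, t :: rest)

-- A's first `for i in range(n)` loop over state (right, stack)
def loop1 (nums : List Int) (n : Nat) : List Int × List Nat :=
  (List.range n).foldl
    (fun rs i =>
      let rs' := popLoop nums i rs.1 rs.2
      (rs'.1, i :: rs'.2))
    (List.replicate n (-1 : Int), [])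

def rightSmall (nums : List Int) : List Int :=
  let n := nums.length
  let r := (loop1 nums n).1
  -- A's second loop: right[i] = n - i if right[i] == -1 else right[i] - i
  (List.range n).foldl
    (fun r i =>
      r.set i (if r.getD i 0 = -1 then (n : Int) - (i : Int) else r.getD i 0 - (i : Int)))
    r

-- ===== PORT B =====
-- Source B's inner `for j in range(i+1, n): if nums[j] < nums[i]: … break`
def scanFirst (nums : List Int) (v : Int) : List Nat → Option Nat
  | [] => none
  | j :: rest => if nums.getD j 0 < v then some j else scanFirst nums v rest

def rightSmall_alt (nums : List Int) : List Int :=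
  let n := nums.length
  (List.range n).map (fun i =>
    match scanFirst nums (nums.getD i 0) (List.range' (i + 1) (n - (i + 1))) with
    | some j => (j : Int) - (i : Int)
    | none => (n : Int) - (i : Int))

-- ===== PRECONDITION & SPEC =====
def Spec_rightSmall (nums : List Int) (out : List Int) : Prop := out = rightSmall_alt nums
instance (nums : List Int) (out : List Int) : Decidable (Spec_rightSmall nums out) := by unfold Spec_rightSmall; infer_instance

-- ===== CLAIM (what is proved, stated in full; the proofs are below) =====
def Claim_equal_rightSmall : Prop := ∀ (nums : List Int), Dom_rightSmall nums → Spec_rightSmall nums (rightSmall nums)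

-- ===== LEMMAS AND PROOFS =====

-- first index k with j < k < m and nums[k] < nums[j] (none if there is none)
def fs (nums : List Int) (j m : Nat) : Option Nat :=
  scanFirst nums (nums.getD j 0) (List.range' (j + 1) (m - (j + 1)))

theorem scanFirst_append (nums : List Int) (v : Int) (l1 l2 : List Nat) :
    scanFirst nums v (l1 ++ l2) =
      match scanFirst nums v l1 with
      | some k => some k
      | none => scanFirst nums v l2 := by
  induction l1 with
  | nil => simp [scanFirst]
  | cons a l ih =>
    simp only [List.cons_append, scanFirst]
    split <;> simp [ih]

theorem scanFirst_none_iff (nums : List Int) (v : Int) (l : List Nat) :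
    scanFirst nums v l = none ↔ ∀ j ∈ l, ¬ nums.getD j 0 < v := by
  induction l with
  | nil => simp [scanFirst]
  | cons a l ih =>
    simp only [scanFirst, List.mem_cons]
    split
    next h =>
      constructor
      · intro hc; exact absurd hc (by simp)
      · intro hall; exact absurd h (hall a (Or.inl rfl))
    next h => simp only [ih]; constructor
              · rintro hall j (rfl | hj); exact h; exact hall j hj
              · intro hall j hj; exact hall j (Or.inr hj)

theorem fs_none_iff (nums : List Int) (j m : Nat) :
    fs nums j m = none ↔ ∀ k, j < k → k < m → ¬ nums.getD k 0 < nums.getD j 0 := by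
  unfold fs
  rw [scanFirst_none_iff]
  constructor
  · intro h k hk1 hk2
    exact h k (by simp only [List.mem_range'_1]; omega)
  · intro h k hk
    simp only [List.mem_range'_1] at hk
    exact h k (by omega) (by omega)

theorem fs_succ (nums : List Int) (j m : Nat) (hj : j < m) :
    fs nums j (m + 1) =
      match fs nums j m with
      | some k => some k
      | none => if nums.getD m 0 < nums.getD j 0 then some m else none := by
  unfold fs
  have h1 : m + 1 - (j + 1) = (m - (j + 1)) + 1 := by omega
  have h2 : List.range' (j + 1) ((m - (j + 1)) + 1) =
      List.range' (j + 1) (m - (j + 1)) ++ [j + 1 + (m - (j + 1))] := by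
    simp [List.range'_concat]
  have h3 : j + 1 + (m - (j + 1)) = m := by omega
  rw [h1, h2, h3, scanFirst_append]
  cases scanFirst nums (nums.getD j 0) (List.range' (j + 1) (m - (j + 1))) <;>
    simp [scanFirst]

theorem fs_none_of_le (nums : List Int) (j m : Nat) (h : m ≤ j + 1) : fs nums j m = none := by
  simp [fs, Nat.sub_eq_zero_of_le h, scanFirst]

-- popLoop = (set all of takeWhile, keep dropWhile)
theorem popLoop_eq (nums : List Int) (i : Nat) (r : List Int) (s : List Nat) :
    popLoop nums i r s =
      ((s.takeWhile (fun t => decide (nums.getD i 0 < nums.getD t 0))).foldl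
          (fun r t => r.set t (i : Int)) r,
        s.dropWhile (fun t => decide (nums.getD i 0 < nums.getD t 0))) := by
  induction s generalizing r with
  | nil => simp [popLoop]
  | cons t rest ih =>
    simp only [popLoop, List.takeWhile_cons, List.dropWhile_cons, decide_eq_true_eq]
    by_cases h : nums.getD i 0 < nums.getD t 0
    · simp only [if_pos h, ih, List.foldl_cons]
    · simp only [if_neg h, List.foldl_nil]

theorem foldl_set_length (v : Int) (l : List Nat) (r : List Int) :
    (l.foldl (fun r t => r.set t v) r).length = r.length := by
  induction l generalizing r with
  | nil => rfl
  | cons a l ih => simp [List.foldl, ih]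

theorem foldl_set_getD (v : Int) (l : List Nat) (r : List Int) (j : Nat) :
    (l.foldl (fun r t => r.set t v) r).getD j 0 =
      if j ∈ l ∧ j < r.length then v else r.getD j 0 := by
  induction l generalizing r with
  | nil => simp
  | cons a l ih =>
    simp only [List.foldl_cons, ih, List.length_set, List.mem_cons]
    by_cases hj : j < r.length
    · by_cases hmem : j ∈ l
      · simp [hmem, hj]
      · by_cases hja : j = a
        · subst hja
          simp [hmem, hj, List.getD_eq_getElem?_getD]
        · simp [hmem, hja, hj, List.getD_eq_getElem?_getD, Ne.symm hja]
    · simp [hj]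

def step1 (nums : List Int) (rs : List Int × List Nat) (i : Nat) : List Int × List Nat :=
  let rs' := popLoop nums i rs.1 rs.2
  (rs'.1, i :: rs'.2)

-- the loop-1 invariant
def StackInv (nums : List Int) (m : Nat) (rs : List Int × List Nat) : Prop :=
  rs.1.length = nums.length ∧
  rs.2.Pairwise (· > ·) ∧
  (∀ j ∈ rs.2, j < m) ∧
  (∀ j, j < m →
    (match fs nums j m with
     | none => j ∈ rs.2 ∧ rs.1.getD j 0 = -1
     | some k => j ∉ rs.2 ∧ rs.1.getD j 0 = (k : Int))) ∧
  (∀ j, m ≤ j → j < nums.length → rs.1.getD j 0 = -1)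

theorem Inv_step (nums : List Int) (m : Nat) (rs : List Int × List Nat)
    (hm : m < nums.length) (h : StackInv nums m rs) : StackInv nums (m + 1) (step1 nums rs m) := by
  obtain ⟨hlen, hpw, hlt, hmain, hrest⟩ := h
  obtain ⟨r, s⟩ := rs
  simp only at hlen hpw hlt hmain hrest
  set P : Nat → Bool := fun t => decide (nums.getD m 0 < nums.getD t 0) with hP
  have hsplit : s = s.takeWhile P ++ s.dropWhile P := (List.takeWhile_append_dropWhile).symm
  have hpw' : (s.takeWhile P ++ s.dropWhile P).Pairwise (· > ·) := by rw [← hsplit]; exact hpw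
  rw [List.pairwise_append] at hpw'
  obtain ⟨hpwTake, hpwDrop, hcross⟩ := hpw'
  have hstep : step1 nums (r, s) m =
      ((s.takeWhile P).foldl (fun r t => r.set t (m : Int)) r, m :: s.dropWhile P) := by
    simp [step1, popLoop_eq, hP]
  rw [hstep]
  set r' := (s.takeWhile P).foldl (fun r t => r.set t (m : Int)) r with hr'
  have hr'len : r'.length = nums.length := by rw [hr', foldl_set_length, hlen]
  have hget : ∀ j : Nat, r'.getD j 0 =
      if j ∈ s.takeWhile P ∧ j < r.length then (m : Int) else r.getD j 0 := by
    intro j; rw [hr', foldl_set_getD]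
  -- membership in s ↔ membership in one of the two parts
  have hmem_s : ∀ j, j ∈ s ↔ (j ∈ s.takeWhile P ∨ j ∈ s.dropWhile P) := by
    intro j
    conv_lhs => rw [hsplit]
    exact List.mem_append
  refine ⟨hr'len, ?_, ?_, ?_, ?_⟩
  · -- pairwise on m :: dropWhile
    refine List.pairwise_cons.mpr ⟨?_, hpwDrop⟩
    intro a ha
    exact hlt a ((hmem_s a).mpr (Or.inr ha))
  · intro j hj
    rcases List.mem_cons.mp hj with h | h
    · omega
    · have := hlt j ((hmem_s j).mpr (Or.inr h)); omega
  · intro j hj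
    by_cases hjm : j = m
    · -- the new index
      subst hjm
      rw [fs_none_of_le nums j (j + 1) le_rfl]
      refine ⟨List.mem_cons_self, ?_⟩
      have hnt : j ∉ s.takeWhile P := fun hc => by
        have := hlt j ((hmem_s j).mpr (Or.inl hc)); omega
      simp only []
      rw [hget, if_neg (by simp [hnt])]
      exact hrest j le_rfl hm
    · have hjm' : j < m := by omega
      have := hmain j hjm'
      rw [fs_succ nums j m hjm']
      cases hfs : fs nums j m with
      | some k =>
        -- already answered: unchanged
        rw [hfs] at this
        obtain ⟨hnotin, hval⟩ := this
        simp only []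
        constructor
        · intro hc
          rcases List.mem_cons.mp hc with h | h
          · exact hjm h
          · exact hnotin ((hmem_s j).mpr (Or.inr h))
        · have hnt : j ∉ s.takeWhile P := fun hc => hnotin ((hmem_s j).mpr (Or.inl hc))
          rw [hget, if_neg (by simp [hnt])]
          exact hval
      | none =>
        rw [hfs] at this
        obtain ⟨hin, hval⟩ := this
        have hno : ∀ k, j < k → k < m → ¬ nums.getD k 0 < nums.getD j 0 :=
          (fs_none_iff nums j m).mp hfs
        rcases (hmem_s j).mp hin with htk | hdr
        · -- popped now: nums[m] < nums[j]
          have hsm : nums.getD m 0 < nums.getD j 0 := by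
            have := List.mem_takeWhile_imp htk
            simpa [hP] using this
          simp only [hsm, if_pos]
          constructor
          · intro hc
            rcases List.mem_cons.mp hc with h | h
            · exact hjm h
            · exact absurd rfl (ne_of_gt (hcross j htk j h))
          · have hjr : j < r.length := by rw [hlen]; exact lt_trans hjm' hm
            rw [hget, if_pos ⟨htk, hjr⟩]
        · -- kept: nums[j] ≤ nums[m]
          have hjle : ¬ nums.getD m 0 < nums.getD j 0 := by
            cases hd : s.dropWhile P with
            | nil => rw [hd] at hdr; simp at hdr
            | cons t rest =>
              have hnn : s.dropWhile P ≠ [] := by rw [hd]; simp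
              have hthead := List.head_dropWhile_not P hnn
              have hht : (s.dropWhile P).head hnn = t := by simp [hd]
              rw [hht] at hthead
              have htle : ¬ nums.getD m 0 < nums.getD t 0 := by simpa [hP] using hthead
              rw [hd] at hdr
              rcases List.mem_cons.mp hdr with h | h
              · subst h; exact htle
              · -- j deeper than t: t > j, t ∈ (j, m), so nums[j] ≤ nums[t] ≤ nums[m]
                have htj : t > j := by
                  have := List.pairwise_cons.mp (by rw [← hd]; exact hpwDrop)
                  exact this.1 j h
                have htm : t < m := hlt t ((hmem_s t).mpr (Or.inr (by rw [hd]; simp)))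
                have h1 := hno t htj htm
                intro hc; apply h1; omega
          simp only [hjle, reduceIte]
          constructor
          · exact List.mem_cons_of_mem _ hdr
          · have hnt : j ∉ s.takeWhile P := fun hc =>
              absurd rfl (ne_of_gt (hcross j hc j hdr))
            rw [hget, if_neg (by simp [hnt])]
            exact hval
  · intro j hj hjn
    have hnt : j ∉ s.takeWhile P := fun hc => by
      have := hlt j ((hmem_s j).mpr (Or.inl hc)); omega
    rw [hget, if_neg (by simp [hnt])]
    exact hrest j (by omega) hjn

theorem Inv_loop1 (nums : List Int) : StackInv nums nums.length (loop1 nums nums.length) := by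
  unfold loop1
  have key : ∀ m : Nat, m ≤ nums.length →
      StackInv nums m ((List.range m).foldl (step1 nums) (List.replicate nums.length (-1 : Int), [])) := by
    intro m
    induction m with
    | zero =>
      intro _
      refine ⟨by simp, by simp, by simp, by simp, ?_⟩
      intro j _ hj
      simp [List.getD_eq_getElem?_getD, hj]
    | succ m ih =>
      intro hm
      rw [List.range_succ, List.foldl_append, List.foldl_cons, List.foldl_nil]
      exact Inv_step nums m _ (by omega) (ih (by omega))
  exact key nums.length le_rfl

theorem loop2_getD (g : Nat → Int → Int) (l : List Nat) (r : List Int)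
    (hl : l.Pairwise (· < ·)) :
    ∀ j : Nat,
      ((l.foldl (fun r i => r.set i (g i (r.getD i 0))) r).getD j 0) =
        if j ∈ l ∧ j < r.length then g j (r.getD j 0) else r.getD j 0 := by
  induction l generalizing r with
  | nil => simp
  | cons a l ih =>
    intro j
    have hpc := List.pairwise_cons.mp hl
    simp only [List.foldl_cons]
    rw [ih _ hpc.2 j]
    set r1 := r.set a (g a (r.getD a 0)) with hr1
    have hr1len : r1.length = r.length := by simp [hr1]
    by_cases hjr : j < r.length
    · by_cases hmem : j ∈ l
      · have hja : a < j := hpc.1 j hmem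
        have hne : a ≠ j := by omega
        simp [hmem, hjr, hr1, hne, List.getD_eq_getElem?_getD]
      · by_cases hja : j = a
        · subst hja
          simp [hmem, hjr, hr1, List.getD_eq_getElem?_getD]
        · simp [hmem, hja, hjr, hr1, Ne.symm hja, List.getD_eq_getElem?_getD]
    · simp [hjr, hr1len]

theorem loop2_length (g : Nat → Int → Int) (l : List Nat) (r : List Int) :
    (l.foldl (fun r i => r.set i (g i (r.getD i 0))) r).length = r.length := by
  induction l generalizing r with
  | nil => rfl
  | cons a l ih =>
    simp only [List.foldl_cons]
    rw [ih]
    simp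

theorem rightSmall_eq_alt (nums : List Int) : rightSmall nums = rightSmall_alt nums := by
  obtain ⟨hlen, -, -, hmain, -⟩ := Inv_loop1 nums
  set n := nums.length with hn
  set r := (loop1 nums n).1 with hr
  set g : Nat → Int → Int := fun i v => if v = -1 then (n : Int) - (i : Int) else v - (i : Int)
    with hg
  have hA : rightSmall nums = (List.range n).foldl (fun r i => r.set i (g i (r.getD i 0))) r := rfl
  have hBlen : (rightSmall_alt nums).length = n := by rw [hn]; simp [rightSmall_alt]
  have hAlen : (rightSmall nums).length = n := by rw [hA, loop2_length, hlen]
  apply List.ext_getElem (by rw [hAlen, hBlen])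
  intro j h1 h2
  have hjn : j < n := by rw [hAlen] at h1; exact h1
  have hjr : j < r.length := by rw [hlen]; exact hjn
  have hDA : (rightSmall nums).getD j 0 = g j (r.getD j 0) := by
    rw [hA, loop2_getD g (List.range n) r List.pairwise_lt_range j,
      if_pos ⟨List.mem_range.mpr hjn, hjr⟩]
  have hDB : (rightSmall_alt nums).getD j 0 =
      match fs nums j n with
      | some k => (k : Int) - (j : Int)
      | none => (n : Int) - (j : Int) := by
    rw [List.getD_eq_getElem?_getD, List.getElem?_eq_getElem (by rw [hBlen]; exact hjn)]
    simp only [Option.getD_some]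
    simp only [rightSmall_alt, fs, ← hn, List.getElem_map, List.getElem_range]
  have hgoal : (rightSmall nums).getD j 0 = (rightSmall_alt nums).getD j 0 := by
    rw [hDA, hDB]
    have hm := hmain j hjn
    cases hfs : fs nums j n with
    | none =>
      rw [hfs] at hm
      rw [hm.2]
      simp [hg]
    | some k =>
      rw [hfs] at hm
      have hk : ¬((k : Int) = -1) := by omega
      rw [hm.2]
      simp [hg, hk]
  rw [List.getD_eq_getElem?_getD, List.getElem?_eq_getElem h1] at hgoal
  rw [List.getD_eq_getElem?_getD, List.getElem?_eq_getElem h2] at hgoal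
  simpa using hgoal

-- ===== VERDICT (by name: the statement is the Claim_ definition above) =====
theorem rightSmall_spec : Claim_equal_rightSmall := by
  intro nums _
  unfold Spec_rightSmall
  exact rightSmall_eq_alt nums
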